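-- pv_equiv track=rewrite | github.com/danialeyz/ShipSure | run_tests_daytona.py | detect_test_command
-- ===== SOURCE A (Python) =====
-- from typing import Optional, Dict, List, Set
--
-- def detect_test_command(files: Dict[str, str]) -> str:
--     """Detect the appropriate test command based on files"""
--     # Check for common test frameworks
--     test_files = [f for f in files.keys() if 'test' in f.lower() or 'spec' in f.lower()]
--
--     if any(f.endswith('.py') for f in test_files):
--         # Check for pytest
--         if any('pytest' in files.get(f, '') or 'import pytest' in files.get(f, '') for f in test_files):
--             return "python -m pytest"
--         # Check for unittest
--         elif any('unittest' in files.get(f, '') or 'import unittest' in files.get(f, '') for f in test_files):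
--             return "python -m unittest discover"
--         else:
--             return "python -m pytest"  # Default to pytest
--
--     elif any(f.endswith('.js') or f.endswith('.ts') for f in test_files):
--         return "npm test"
--
--     elif any(f.endswith('.java') for f in test_files):
--         return "mvn test"
--
--     else:
--         return "python -m pytest"  # Default
-- ===== SOURCE B (Python) =====
-- def detect_test_command(files):
--     """Detect the appropriate test command based on files"""
--     has_py = has_js_ts = has_java = has_pytest = has_unittest = False
--     for name, content in files.items():
--         low = name.lower()
--         if 'test' not in low and 'spec' not in low:
--             continue
--         has_py = has_py or name.endswith('.py')
--         has_js_ts = has_js_ts or name.endswith('.js') or name.endswith('.ts')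
--         has_java = has_java or name.endswith('.java')
--         has_pytest = has_pytest or 'pytest' in content
--         has_unittest = has_unittest or 'unittest' in content
--     if has_py:
--         if has_pytest:
--             return "python -m pytest"
--         if has_unittest:
--             return "python -m unittest discover"
--         return "python -m pytest"
--     if has_js_ts:
--         return "npm test"
--     if has_java:
--         return "mvn test"
--     return "python -m pytest"
-- ===== Notes on version B (the rewrite author's own statement) =====
-- stated objective: simpler
-- what changed: Replaces the filtered key list plus five separate any()-scans with dict lookups by a single pass over files.items() that accumulates five booleans (dropping the redundant 'import pytest'/'import unittest' substring checks, which are subsumed by 'pytest'/'unittest'), then branches once.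
import Mathlib
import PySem

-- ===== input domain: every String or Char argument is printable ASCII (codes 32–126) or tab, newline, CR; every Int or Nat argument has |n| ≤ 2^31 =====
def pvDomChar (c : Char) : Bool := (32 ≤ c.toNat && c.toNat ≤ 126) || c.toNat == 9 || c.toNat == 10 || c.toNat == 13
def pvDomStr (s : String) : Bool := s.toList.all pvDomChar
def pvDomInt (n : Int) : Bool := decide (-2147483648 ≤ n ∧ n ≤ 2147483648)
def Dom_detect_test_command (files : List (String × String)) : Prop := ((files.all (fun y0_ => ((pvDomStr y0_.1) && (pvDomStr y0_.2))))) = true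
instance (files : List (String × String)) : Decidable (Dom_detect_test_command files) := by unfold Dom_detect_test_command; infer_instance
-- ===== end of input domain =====

-- B replaces A's filtered key list and five separate any()-scans with dict lookups by a
-- single pass over the items accumulating five booleans (simpler, one traversal).

-- ===== PORT A =====
def detect_test_command (files : List (String × String)) : String :=
  let d := PySem.Dict.ofList files
  let test_files := d.keys.filter (fun f =>
    PySem.Str.isIn "test" (PySem.Str.lower f) || PySem.Str.isIn "spec" (PySem.Str.lower f))
  if test_files.any (fun f => PySem.Str.endswith f ".py") then
    if test_files.any (fun f =>
        PySem.Str.isIn "pytest" (d.getD f "") || PySem.Str.isIn "import pytest" (d.getD f "")) then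
      "python -m pytest"
    else if test_files.any (fun f =>
        PySem.Str.isIn "unittest" (d.getD f "") || PySem.Str.isIn "import unittest" (d.getD f "")) then
      "python -m unittest discover"
    else
      "python -m pytest"
  else if test_files.any (fun f => PySem.Str.endswith f ".js" || PySem.Str.endswith f ".ts") then
    "npm test"
  else if test_files.any (fun f => PySem.Str.endswith f ".java") then
    "mvn test"
  else
    "python -m pytest"

-- ===== PORT B =====
def detect_test_command_alt (files : List (String × String)) : String :=
  let st := (PySem.Dict.ofList files).items.foldl (fun st p =>
      let low := PySem.Str.lower p.1
      if !PySem.Str.isIn "test" low && !PySem.Str.isIn "spec" low then st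
      else
        (st.1 || PySem.Str.endswith p.1 ".py",
         st.2.1 || PySem.Str.endswith p.1 ".js" || PySem.Str.endswith p.1 ".ts",
         st.2.2.1 || PySem.Str.endswith p.1 ".java",
         st.2.2.2.1 || PySem.Str.isIn "pytest" p.2,
         st.2.2.2.2 || PySem.Str.isIn "unittest" p.2))
    (false, false, false, false, false)
  if st.1 then
    if st.2.2.2.1 then "python -m pytest"
    else if st.2.2.2.2 then "python -m unittest discover"
    else "python -m pytest"
  else if st.2.1 then "npm test"
  else if st.2.2.1 then "mvn test"
  else "python -m pytest"

-- ===== PRECONDITION & SPEC =====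
def Spec_detect_test_command (files : List (String × String)) (out : String) : Prop := out = detect_test_command_alt files
instance (files : List (String × String)) (out : String) : Decidable (Spec_detect_test_command files out) := by unfold Spec_detect_test_command; infer_instance

-- ===== CLAIM (what is proved, stated in full; the proofs are below) =====
def Claim_equal_detect_test_command : Prop := ∀ (files : List (String × String)), Dom_detect_test_command files → Spec_detect_test_command files (detect_test_command files)

-- ===== LEMMAS AND PROOFS =====

-- the test-file filter predicate, on a (name, content) pair
def pvQ (p : String × String) : Bool :=
  PySem.Str.isIn "test" (PySem.Str.lower p.1) || PySem.Str.isIn "spec" (PySem.Str.lower p.1)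

-- B's fold computes, per component, (init ||) the any over the filtered list
theorem pvFoldFlags (L : List (String × String)) (st0 : Bool × Bool × Bool × Bool × Bool) :
    L.foldl (fun st p =>
      let low := PySem.Str.lower p.1
      if !PySem.Str.isIn "test" low && !PySem.Str.isIn "spec" low then st
      else
        (st.1 || PySem.Str.endswith p.1 ".py",
         st.2.1 || PySem.Str.endswith p.1 ".js" || PySem.Str.endswith p.1 ".ts",
         st.2.2.1 || PySem.Str.endswith p.1 ".java",
         st.2.2.2.1 || PySem.Str.isIn "pytest" p.2,
         st.2.2.2.2 || PySem.Str.isIn "unittest" p.2)) st0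
    = (st0.1 || (L.filter pvQ).any (fun p => PySem.Str.endswith p.1 ".py"),
       st0.2.1 || (L.filter pvQ).any (fun p => PySem.Str.endswith p.1 ".js" || PySem.Str.endswith p.1 ".ts"),
       st0.2.2.1 || (L.filter pvQ).any (fun p => PySem.Str.endswith p.1 ".java"),
       st0.2.2.2.1 || (L.filter pvQ).any (fun p => PySem.Str.isIn "pytest" p.2),
       st0.2.2.2.2 || (L.filter pvQ).any (fun p => PySem.Str.isIn "unittest" p.2)) := by
  induction L generalizing st0 with
  | nil => simp
  | cons p L ih =>
    obtain ⟨b1, b2, b3, b4, b5⟩ := st0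
    simp only [List.foldl_cons, List.filter_cons]
    rw [show (!PySem.Str.isIn "test" (PySem.Str.lower p.1) &&
        !PySem.Str.isIn "spec" (PySem.Str.lower p.1)) = !(pvQ p) from (Bool.not_or _ _).symm]
    cases hq : pvQ p
    · rw [Bool.not_false, if_pos rfl, if_neg (by simp), ih]
    · rw [Bool.not_true, if_neg (by simp), if_pos rfl, ih]
      simp only [List.any_cons, Bool.or_assoc]

-- 'pytest' in c or 'import pytest' in c  ==  'pytest' in c  (the second is a superstring)
theorem pvSubsume (sub big c : String) (h : sub.toList <:+: big.toList) :
    (PySem.Str.isIn sub c || PySem.Str.isIn big c) = PySem.Str.isIn sub c := by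
  cases hs : PySem.Str.isIn sub c with
  | true => simp
  | false =>
    cases hb : PySem.Str.isIn big c with
    | false => simp
    | true =>
      have hsub : PySem.Str.isIn sub c = true :=
        (PySem.Str.isIn_iff_infix _ _).mpr (h.trans ((PySem.Str.isIn_iff_infix _ _).mp hb))
      rw [hs] at hsub; exact absurd hsub (by simp)

-- ===== VERDICT (by name: the statement is the Claim_ definition above) =====
theorem detect_test_command_spec : Claim_equal_detect_test_command := by
  intro files _
  unfold Spec_detect_test_command detect_test_command detect_test_command_alt
  rw [pvFoldFlags]
  set d := PySem.Dict.ofList files with hd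
  have hnd : d.keys.Nodup := PySem.Dict.nodup_keys_ofList files
  have hitems : d.items = d.keys.map (fun k => (k, d.getD k "")) :=
    PySem.Dict.items_eq_map_keys d hnd ""
  rw [hitems]
  simp only [List.filter_map, List.any_map, Bool.false_or, Function.comp_def, pvQ,
    pvSubsume "pytest" "import pytest" _ (by decide),
    pvSubsume "unittest" "import unittest" _ (by decide)]
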